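-- pv_equiv track=rewrite | github.com/minhnbnt/ptit_solutions | dsa/DSA08004.py | minimumValue
-- ===== SOURCE A (Python) =====
-- from collections import Counter
-- from heapq import heapify, heappop, heappush
--
-- def minimumValue(string: str, removeAttempt: int) -> int:
--     charsCounter = Counter(string)
--
--     # default is min-heap, so we use negative
--     queue = [-value for value in charsCounter.values()]
--     heapify(queue)
--
--     for _ in range(removeAttempt):
--         value = heappop(queue)
--         heappush(queue, value + 1)
--
--     return sum(value**2 for value in queue)
-- ===== SOURCE B (Python) =====
-- from collections import Counter
--
--
-- def minimumValue(string: str, removeAttempt: int) -> int: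
--     # Water-filling: sort the counts descending and lower the highest
--     # counts level by level arithmetically instead of one heap pop at a time.
--     counts = sorted(Counter(string).values(), reverse=True)
--     if removeAttempt <= 0:
--         return sum(c * c for c in counts)
--     k = removeAttempt
--     for i in range(len(counts) - 1):
--         cost = (i + 1) * (counts[i] - counts[i + 1])
--         if k < cost:
--             q, r = divmod(k, i + 1)
--             level = counts[i] - q
--             return (r * (level - 1) ** 2 + (i + 1 - r) * level ** 2
--                     + sum(c * c for c in counts[i + 1:]))
--         k -= cost
--     d = len(counts)
--     q, r = divmod(k, d)
--     level = counts[-1] - q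
--     return r * (level - 1) ** 2 + (d - r) * level ** 2
-- ===== Notes on version B (the rewrite author's own statement) =====
-- stated objective: faster
-- what changed: Replaces the removeAttempt-iteration heap loop (pop max count, decrement, push back) by sorting the distinct-char counts descending once and water-filling: batch-decrementing whole top levels arithmetically with one divmod, so the running time no longer depends on removeAttempt.
import Mathlib
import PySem

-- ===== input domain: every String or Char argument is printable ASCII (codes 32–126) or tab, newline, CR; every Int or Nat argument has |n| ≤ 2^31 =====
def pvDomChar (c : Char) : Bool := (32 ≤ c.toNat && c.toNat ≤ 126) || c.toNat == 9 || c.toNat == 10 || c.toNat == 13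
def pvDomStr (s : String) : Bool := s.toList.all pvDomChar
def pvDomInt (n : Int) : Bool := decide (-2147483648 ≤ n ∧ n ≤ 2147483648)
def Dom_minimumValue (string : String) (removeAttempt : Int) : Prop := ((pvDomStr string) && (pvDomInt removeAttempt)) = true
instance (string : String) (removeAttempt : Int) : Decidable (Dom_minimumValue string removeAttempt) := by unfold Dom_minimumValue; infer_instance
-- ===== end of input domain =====

-- B replaces A's removeAttempt-iteration heap loop by sort-descending + arithmetic water-filling
-- over count levels (objective: faster; time independent of removeAttempt).


-- ===== PORT A =====
-- The heap is modelled by its list of elements: heapify only reorders (identity on the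
-- multiset), heappop removes the minimum element, heappush appends.  This is exact for the
-- popped value and for the final multiset, and A's result depends only on those.
def pvLoopA : Nat → List Int → List Int
  | 0, q => q
  | n + 1, q =>
    match PySem.List.min? q (fun v => v) with
    | none => q          -- heappop on an empty heap raises IndexError; excluded by Pre_
    | some m => pvLoopA n ((q.erase m) ++ [m + 1])

def minimumValue (string : String) (removeAttempt : Int) : Int :=
  let charsCounter := PySem.Dict.counter string.toList
  let queue := charsCounter.values.map (fun value => -value)
  let queue := pvLoopA removeAttempt.toNat queue
  (queue.map (fun value => value ^ (2 : Nat))).sum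

-- ===== PORT B =====
def pvSumSq (l : List Int) : Int := (l.map (fun c => c * c)).sum

-- the `for i in range(len(counts)-1)` loop of Source B; falls through to the code after the loop
def pvGoB (counts : List Int) (k : Int) (i : Nat) : Int :=
  if h : i + 1 < counts.length then
    let ci := PySem.List.pyGetD counts (i : Int) 0
    let ci1 := PySem.List.pyGetD counts ((i : Int) + 1) 0
    let cost := ((i : Int) + 1) * (ci - ci1)
    if k < cost then
      let q := PySem.Int.floordiv k ((i : Int) + 1)
      let r := PySem.Int.mod k ((i : Int) + 1)
      let level := ci - q
      r * (level - 1) ^ (2 : Nat) + (((i : Int) + 1) - r) * level ^ (2 : Nat)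
        + pvSumSq (PySem.List.slice counts (some ((i : Int) + 1)) none)
    else
      pvGoB counts (k - cost) (i + 1)
  else
    let d : Int := (counts.length : Int)
    let q := PySem.Int.floordiv k d     -- divmod(k, 0) raises ZeroDivisionError; excluded by Pre_
    let r := PySem.Int.mod k d
    let level := PySem.List.pyGetD counts (-1) 0 - q
    r * (level - 1) ^ (2 : Nat) + (d - r) * level ^ (2 : Nat)
termination_by counts.length - i

def minimumValue_alt (string : String) (removeAttempt : Int) : Int :=
  let counts := PySem.List.sorted (PySem.Dict.counter string.toList).values (fun v => v) (reverse := true)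
  if removeAttempt ≤ 0 then pvSumSq counts
  else pvGoB counts removeAttempt 0

-- ===== PRECONDITION & SPEC =====
-- Pre_ excludes only the empty string with removeAttempt > 0, where A's heappop raises
-- IndexError (and B's divmod(k, 0) raises ZeroDivisionError).
def Pre_minimumValue (string : String) (removeAttempt : Int) : Prop :=
  removeAttempt ≤ 0 ∨ string ≠ ""
instance (string : String) (removeAttempt : Int) : Decidable (Pre_minimumValue string removeAttempt) := by unfold Pre_minimumValue; infer_instance

def pvWitness_minimumValue : String × Int := ("aab", 3)

def Spec_minimumValue (string : String) (removeAttempt : Int) (out : Int) : Prop := out = minimumValue_alt string removeAttempt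
instance (string : String) (removeAttempt : Int) (out : Int) : Decidable (Spec_minimumValue string removeAttempt out) := by unfold Spec_minimumValue; infer_instance

-- ===== CLAIM (what is proved, stated in full; the proofs are below) =====
def Claim_equal_minimumValue : Prop := ∀ (string : String) (removeAttempt : Int), Dom_minimumValue string removeAttempt → Pre_minimumValue string removeAttempt → Spec_minimumValue string removeAttempt (minimumValue string removeAttempt)

-- ===== LEMMAS AND PROOFS =====

-- water level bookkeeping: pvS c L = total number of decrements needed to bring every
-- count of c down to at most L
def pvS (c : List Int) (L : Int) : Int := (c.map (fun x => max (x - L) 0)).sum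

-- its negated-domain twin, matching A's queue of negated counts
def pvT (q : List Int) (Λ : Int) : Int := (q.map (fun v => max (Λ - v) 0)).sum

def pvSqMax (q : List Int) (Λ : Int) : Int := (q.map (fun v => (max v Λ) * (max v Λ))).sum

lemma pvT_nonneg (q : List Int) (Λ : Int) : 0 ≤ pvT q Λ := by
  apply List.sum_nonneg
  intro x hx
  rcases List.mem_map.1 hx with ⟨v, _, rfl⟩
  exact le_max_right _ _

lemma pvT_eq_zero_iff (q : List Int) (Λ : Int) : pvT q Λ = 0 ↔ ∀ v ∈ q, Λ ≤ v := by
  induction q with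
  | nil => simp [pvT]
  | cons v q ih =>
    have hq := pvT_nonneg q Λ
    have hv : (0 : Int) ≤ max (Λ - v) 0 := le_max_right _ _
    have hmax : max (Λ - v) 0 = 0 ↔ Λ ≤ v := by
      rcases le_total (Λ - v) 0 with h | h
      · simp [max_eq_right h]; omega
      · simp [max_eq_left h]; omega
    simp only [pvT, List.map_cons, List.sum_cons] at *
    constructor
    · intro h0
      have h1 : max (Λ - v) 0 = 0 ∧ pvT q Λ = 0 := by unfold pvT at *; omega
      intro v' hv'
      rcases List.mem_cons.1 hv' with rfl | hmem
      · exact hmax.1 h1.1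
      · exact (ih.1 h1.2) v' hmem
    · intro hall
      have h1 : max (Λ - v) 0 = 0 := hmax.2 (hall v (List.mem_cons_self ..))
      have h2 : pvT q Λ = 0 := ih.2 (fun v' hv' => hall v' (List.mem_cons_of_mem _ hv'))
      unfold pvT at *; omega

lemma sum_map_perm {f : Int → Int} {q q' : List Int} (h : q.Perm q') :
    (q.map f).sum = (q'.map f).sum := by
  exact (h.map f).sum_eq

lemma sum_map_erase_append {f : Int → Int} {q : List Int} {m : Int} (hm : m ∈ q) :
    ((q.erase m ++ [m + 1]).map f).sum = (q.map f).sum - f m + f (m + 1) := by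
  have hp : q.Perm (m :: q.erase m) := List.perm_cons_erase hm
  have h1 : (q.map f).sum = f m + ((q.erase m).map f).sum := by
    rw [sum_map_perm hp]; simp
  rw [List.map_append, List.sum_append]
  simp [h1]

lemma pvMain : ∀ (k : Nat) (q : List Int) (Λ r : Int), q ≠ [] →
    pvT q Λ ≤ (k : Int) → (k : Int) < pvT q (Λ + 1) → r = (k : Int) - pvT q Λ →
    ((pvLoopA k q).map (fun v => v * v)).sum = pvSqMax q Λ + r * (2 * Λ + 1) := by
  intro k
  induction k with
  | zero =>
    intro q Λ r hq hle hlt hr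
    have h0 : pvT q Λ = 0 := le_antisymm (by exact_mod_cast hle) (pvT_nonneg q Λ)
    have hall := (pvT_eq_zero_iff q Λ).1 h0
    have hr0 : r = 0 := by push_cast at hr; omega
    have hmap : q.map (fun v => (max v Λ) * (max v Λ)) = q.map (fun v => v * v) :=
      List.map_congr_left (fun v hv => by rw [max_eq_left (hall v hv)])
    simp [pvLoopA, pvSqMax, hmap, hr0]
  | succ n ih =>
    intro q Λ r hq hle hlt hr
    obtain ⟨m, hm⟩ : ∃ m, PySem.List.min? q (fun v => v) = some m := by
      cases hmin : PySem.List.min? q (fun v => v) with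
      | none => exact absurd ((PySem.List.min?_eq_none_iff _ _).1 hmin) hq
      | some m => exact ⟨m, rfl⟩
    have hmem : m ∈ q := PySem.List.min?_mem hm
    have hmins : ∀ v ∈ q, m ≤ v := PySem.List.min?_isMin hm
    have hmΛ : m ≤ Λ := by
      by_contra hc
      push Not at hc
      have h0 : pvT q (Λ + 1) = 0 :=
        (pvT_eq_zero_iff q (Λ + 1)).2 (fun v hv => by have := hmins v hv; omega)
      rw [h0] at hlt
      push_cast at hlt
      omega
    have hq'ne : q.erase m ++ [m + 1] ≠ [] := by simp
    have hstep : pvLoopA (n + 1) q = pvLoopA n (q.erase m ++ [m + 1]) := by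
      simp [pvLoopA, hm]
    have hT : ∀ X : Int, pvT (q.erase m ++ [m + 1]) X
        = pvT q X - max (X - m) 0 + max (X - m - 1) 0 := by
      intro X
      unfold pvT
      rw [sum_map_erase_append hmem]
      ring_nf
    have hSq : pvSqMax (q.erase m ++ [m + 1]) Λ
        = pvSqMax q Λ - (max m Λ) * (max m Λ) + (max (m + 1) Λ) * (max (m + 1) Λ) := by
      unfold pvSqMax
      rw [sum_map_erase_append hmem]
    rcases lt_or_eq_of_le hmΛ with hlt' | heq
    · -- the minimum is strictly below the level: the step removes one token below Λ
      have e1 : pvT (q.erase m ++ [m + 1]) Λ = pvT q Λ - 1 := by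
        rw [hT Λ, max_eq_left (show (0 : Int) ≤ Λ - m by omega),
          max_eq_left (show (0 : Int) ≤ Λ - m - 1 by omega)]
        ring
      have e2 : pvT (q.erase m ++ [m + 1]) (Λ + 1) = pvT q (Λ + 1) - 1 := by
        rw [hT (Λ + 1), max_eq_left (show (0 : Int) ≤ Λ + 1 - m by omega),
          max_eq_left (show (0 : Int) ≤ Λ + 1 - m - 1 by omega)]
        ring
      have hrec := ih (q.erase m ++ [m + 1]) Λ r hq'ne
        (by rw [e1]; push_cast at hle ⊢; omega)
        (by rw [e2]; push_cast at hlt ⊢; omega)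
        (by rw [e1]; push_cast at hr ⊢; omega)
      rw [hstep, hrec, hSq, max_eq_right (show m ≤ Λ from le_of_lt hlt'),
        max_eq_right (show m + 1 ≤ Λ by omega)]
      ring
    · -- the minimum sits exactly at the level: the step raises one token from Λ to Λ + 1
      subst heq
      have h0 : pvT q m = 0 := (pvT_eq_zero_iff q m).2 hmins
      have e1 : pvT (q.erase m ++ [m + 1]) m = 0 := by
        rw [hT m, h0]
        norm_num
      have e2 : pvT (q.erase m ++ [m + 1]) (m + 1) = pvT q (m + 1) - 1 := by
        rw [hT (m + 1)]
        norm_num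
      have hrec := ih (q.erase m ++ [m + 1]) m (r - 1) hq'ne
        (by rw [e1]; positivity)
        (by rw [e2]; push_cast at hlt ⊢; omega)
        (by rw [e1]; push_cast at hr ⊢; rw [h0] at hr; omega)
      rw [hstep, hrec, hSq, max_self, max_eq_left (show m ≤ m + 1 by omega)]
      ring

lemma sum_map_sub_const (l : List Int) (L : Int) :
    (l.map (fun x => x - L)).sum = l.sum - l.length * L := by
  induction l with
  | nil => simp
  | cons x l ih => simp [ih]; ring

lemma sum_map_const (l : List Int) (a : Int) :
    (l.map (fun _ => a)).sum = l.length * a := by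
  induction l with
  | nil => simp
  | cons x l ih =>
    simp only [List.map_cons, List.sum_cons, ih, List.length_cons]
    push_cast
    ring

lemma sorted_desc_le {xs : List Int} (hp : xs.Pairwise (fun a b => b ≤ a)) {j j2 : Nat}
    (hj : j ≤ j2) (hj2 : j2 < xs.length) (hjl : j < xs.length) : xs[j2] ≤ xs[j] := by
  rcases lt_or_eq_of_le hj with h | rfl
  · exact List.pairwise_iff_getElem.1 hp j j2 _ _ h
  · exact le_refl _

lemma mem_take_ge {xs : List Int} (hp : xs.Pairwise (fun a b => b ≤ a)) {i : Nat}
    (hi : i < xs.length) {x : Int} (hx : x ∈ xs.take (i + 1)) : xs[i] ≤ x := by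
  obtain ⟨j, hj, rfl⟩ := List.mem_iff_getElem.1 hx
  have hj' : j < xs.length := lt_of_lt_of_le hj (by simp [List.length_take])
  have hji : j ≤ i := by have := hj; simp [List.length_take] at this; omega
  rw [List.getElem_take]
  exact sorted_desc_le hp hji hi _

lemma mem_drop_le {xs : List Int} (hp : xs.Pairwise (fun a b => b ≤ a)) {i : Nat}
    (hi : i < xs.length) {x : Int} (hx : x ∈ xs.drop i) : x ≤ xs[i] := by
  obtain ⟨j, hj, rfl⟩ := List.mem_iff_getElem.1 hx
  rw [List.getElem_drop]
  exact sorted_desc_le hp (Nat.le_add_right i j) _ hi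

lemma pvS_level (xs : List Int) (n : Nat) (L : Int)
    (h1 : ∀ x ∈ xs.take n, L ≤ x) (h2 : ∀ x ∈ xs.drop n, x ≤ L) :
    pvS xs L = (xs.take n).sum - (xs.take n).length * L := by
  unfold pvS
  conv_lhs => rw [← List.take_append_drop n xs]
  rw [List.map_append, List.sum_append]
  have e1 : (xs.take n).map (fun x => max (x - L) 0) = (xs.take n).map (fun x => x - L) :=
    List.map_congr_left (fun x hx => max_eq_left (by have := h1 x hx; omega))
  have e2 : (xs.drop n).map (fun x => max (x - L) 0) = (xs.drop n).map (fun _ => (0 : Int)) :=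
    List.map_congr_left (fun x hx => max_eq_right (by have := h2 x hx; omega))
  rw [e1, e2, sum_map_sub_const, sum_map_const]
  ring

lemma pvMin_level (xs : List Int) (n : Nat) (L : Int)
    (h1 : ∀ x ∈ xs.take n, L ≤ x) (h2 : ∀ x ∈ xs.drop n, x ≤ L) :
    (xs.map (fun x => (min x L) * (min x L))).sum
      = (xs.take n).length * (L * L) + ((xs.drop n).map (fun x => x * x)).sum := by
  conv_lhs => rw [← List.take_append_drop n xs]
  rw [List.map_append, List.sum_append]
  have e1 : (xs.take n).map (fun x => (min x L) * (min x L)) = (xs.take n).map (fun _ => L * L) :=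
    List.map_congr_left (fun x hx => by rw [min_eq_right (h1 x hx)])
  have e2 : (xs.drop n).map (fun x => (min x L) * (min x L)) = (xs.drop n).map (fun x => x * x) :=
    List.map_congr_left (fun x hx => by rw [min_eq_left (h2 x hx)])
  rw [e1, e2, sum_map_const]

lemma pvGoB_spec (counts : List Int) (hp : counts.Pairwise (fun a b => b ≤ a)) :
    ∀ (fuel i : Nat) (k K : Int), counts.length - i = fuel → ∀ (hi : i < counts.length),
    0 ≤ k → K = k + pvS counts (counts[i]'hi) →
    ∃ L r : Int, pvS counts L ≤ K ∧ K < pvS counts (L - 1) ∧ r = K - pvS counts L ∧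
      pvGoB counts k i = (counts.map (fun x => (min x L) * (min x L))).sum - r * (2 * L - 1) := by
  intro fuel
  induction fuel with
  | zero => intro i k K hfuel hi; omega
  | succ f ihf =>
    intro i k K hfuel hi hk hK
    have len1 : (counts.take (i + 1)).length = i + 1 := by simp [List.length_take]; omega
    have hci_take : ∀ x ∈ counts.take (i + 1), counts[i] ≤ x := fun x hx => mem_take_ge hp hi hx
    have hci_drop : ∀ x ∈ counts.drop (i + 1), x ≤ counts[i] := by
      intro x hx
      by_cases h : i + 1 < counts.length
      · have h1 := mem_drop_le hp h hx
        have h2 : counts[i + 1] ≤ counts[i] := sorted_desc_le hp (Nat.le_succ i) h hi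
        omega
      · rw [List.drop_eq_nil_of_le (by omega)] at hx
        simp at hx
    have eSci : pvS counts (counts[i]) = (counts.take (i + 1)).sum - ((i : Int) + 1) * counts[i] := by
      rw [pvS_level counts (i + 1) _ hci_take hci_drop, len1]
      push_cast
      ring
    rw [pvGoB]
    by_cases h : i + 1 < counts.length
    · rw [dif_pos h]
      have gi : PySem.List.pyGetD counts (i : Int) 0 = counts[i] := by
        rw [PySem.List.pyGetD_natCast]
        exact List.getD_eq_getElem _ _ hi
      have gi1 : PySem.List.pyGetD counts ((i : Int) + 1) 0 = counts[i + 1] := by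
        rw [show ((i : Int) + 1) = ((i + 1 : Nat) : Int) by push_cast; ring, PySem.List.pyGetD_natCast]
        exact List.getD_eq_getElem _ _ h
      simp only [gi, gi1]
      have hpos : (0 : Int) < (i : Int) + 1 := by positivity
      by_cases hkc : k < ((i : Int) + 1) * (counts[i] - counts[i + 1])
      · rw [if_pos hkc]
        have hqe : PySem.Int.floordiv k ((i : Int) + 1) = k / ((i : Int) + 1) :=
          PySem.Int.floordiv_eq_ediv_of_pos hpos
        have hre : PySem.Int.mod k ((i : Int) + 1) = k % ((i : Int) + 1) :=
          PySem.Int.mod_eq_emod_of_pos hpos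
        rw [hqe, hre]
        have hdm : ((i : Int) + 1) * (k / ((i : Int) + 1)) + k % ((i : Int) + 1) = k :=
          Int.mul_ediv_add_emod k _
        have hr0 : 0 ≤ k % ((i : Int) + 1) := Int.emod_nonneg k (by omega)
        have hrlt : k % ((i : Int) + 1) < (i : Int) + 1 := Int.emod_lt_of_pos k hpos
        have hq0 : 0 ≤ k / ((i : Int) + 1) := Int.ediv_nonneg hk (le_of_lt hpos)
        have hqlt : k / ((i : Int) + 1) < counts[i] - counts[i + 1] := by
          have h1 : ((i : Int) + 1) * (k / ((i : Int) + 1))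
              < ((i : Int) + 1) * (counts[i] - counts[i + 1]) := by omega
          exact lt_of_mul_lt_mul_left h1 (by omega)
        have hLle : counts[i] - k / ((i : Int) + 1) ≤ counts[i] := by omega
        have htake : ∀ x ∈ counts.take (i + 1), counts[i] - k / ((i : Int) + 1) ≤ x :=
          fun x hx => le_trans hLle (hci_take x hx)
        have htake1 : ∀ x ∈ counts.take (i + 1), counts[i] - k / ((i : Int) + 1) - 1 ≤ x :=
          fun x hx => by have := hci_take x hx; omega
        have hd1 : ∀ x ∈ counts.drop (i + 1), x ≤ counts[i + 1] := fun x hx => mem_drop_le hp h hx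
        have hdrop : ∀ x ∈ counts.drop (i + 1), x ≤ counts[i] - k / ((i : Int) + 1) :=
          fun x hx => by have := hd1 x hx; omega
        have hdrop1 : ∀ x ∈ counts.drop (i + 1), x ≤ counts[i] - k / ((i : Int) + 1) - 1 :=
          fun x hx => by have := hd1 x hx; omega
        have eSL : pvS counts (counts[i] - k / ((i : Int) + 1))
            = (counts.take (i + 1)).sum - ((i : Int) + 1) * (counts[i] - k / ((i : Int) + 1)) := by
          rw [pvS_level counts (i + 1) _ htake hdrop, len1]
          push_cast
          ring
        have eSL1 : pvS counts (counts[i] - k / ((i : Int) + 1) - 1)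
            = (counts.take (i + 1)).sum
              - ((i : Int) + 1) * (counts[i] - k / ((i : Int) + 1) - 1) := by
          rw [pvS_level counts (i + 1) _ htake1 hdrop1, len1]
          push_cast
          ring
        have eMin := pvMin_level counts (i + 1) (counts[i] - k / ((i : Int) + 1)) htake hdrop
        rw [len1] at eMin
        have hsl : PySem.List.slice counts (some ((i : Int) + 1)) none = counts.drop (i + 1) := by
          rw [show ((i : Int) + 1) = ((i + 1 : Nat) : Int) by push_cast; ring]
          exact PySem.List.slice_from_natCast counts (i + 1)
        have key1 : pvS counts (counts[i] - k / ((i : Int) + 1))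
            = pvS counts (counts[i]) + ((i : Int) + 1) * (k / ((i : Int) + 1)) := by
          rw [eSL, eSci]
          ring
        have key2 : pvS counts (counts[i] - k / ((i : Int) + 1) - 1)
            = pvS counts (counts[i] - k / ((i : Int) + 1)) + ((i : Int) + 1) := by
          rw [eSL1, eSL]
          ring
        refine ⟨counts[i] - k / ((i : Int) + 1), k % ((i : Int) + 1), ?_, ?_, ?_, ?_⟩
        · rw [hK, key1]
          linarith [hdm, hr0]
        · rw [hK, key2, key1]
          linarith [hdm, hrlt]
        · rw [hK, key1]
          linarith [hdm]
        · rw [eMin, hsl]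
          unfold pvSumSq
          push_cast
          ring
      · rw [if_neg hkc]
        have hcost0 : 0 ≤ ((i : Int) + 1) * (counts[i] - counts[i + 1]) := by
          have h2 : counts[i + 1] ≤ counts[i] := sorted_desc_le hp (Nat.le_succ i) h hi
          have h3 : (0:Int) ≤ counts[i] - counts[i+1] := by omega
          positivity
        have htake2 : ∀ x ∈ counts.take (i + 2), counts[i + 1] ≤ x := fun x hx =>
          mem_take_ge hp h hx
        have hdrop2 : ∀ x ∈ counts.drop (i + 2), x ≤ counts[i + 1] := by
          intro x hx
          by_cases h2 : i + 2 < counts.length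
          · have h3 := mem_drop_le hp h2 hx
            have h4 : counts[i + 2] ≤ counts[i + 1] := sorted_desc_le hp (Nat.le_succ (i + 1)) h2 h
            omega
          · rw [List.drop_eq_nil_of_le (by omega)] at hx
            simp at hx
        have len2 : (counts.take (i + 2)).length = i + 2 := by simp [List.length_take]; omega
        have eSci1 : pvS counts (counts[i + 1])
            = (counts.take (i + 2)).sum - ((i : Int) + 2) * counts[i + 1] := by
          rw [pvS_level counts (i + 2) _ htake2 hdrop2, len2]
          push_cast
          ring
        have hsum2 : (counts.take (i + 2)).sum = (counts.take (i + 1)).sum + counts[i + 1] :=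
          List.sum_take_succ counts (i + 1) h
        apply ihf (i + 1) (k - ((i : Int) + 1) * (counts[i] - counts[i + 1])) K (by omega) h
          (by omega)
        rw [eSci1, hsum2]
        rw [eSci] at hK
        push_cast at *
        linarith [hK]
    · rw [dif_neg h]
      have hlen : counts.length = i + 1 := by omega
      have hne : counts ≠ [] := by
        intro hnil
        rw [hnil] at hi
        simp at hi
      have hdpos : (0 : Int) < (counts.length : Int) := by
        rw [hlen]
        positivity
      have glast : PySem.List.pyGetD counts (-1) 0 = counts[i] := by
        rw [PySem.List.pyGetD_neg_one counts 0 hne, List.getLast_eq_getElem]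
        congr 1
        omega
      have hqe : PySem.Int.floordiv k ((i : Int) + 1) = k / ((i : Int) + 1) :=
        PySem.Int.floordiv_eq_ediv_of_pos (by positivity)
      have hre : PySem.Int.mod k ((i : Int) + 1) = k % ((i : Int) + 1) :=
        PySem.Int.mod_eq_emod_of_pos (by positivity)
      have hcast : (counts.length : Int) = (i : Int) + 1 := by rw [hlen]; push_cast; ring
      simp only [glast, hcast, hqe, hre]
      have hdm : ((i : Int) + 1) * (k / ((i : Int) + 1)) + k % ((i : Int) + 1) = k :=
        Int.mul_ediv_add_emod k _
      have hr0 : 0 ≤ k % ((i : Int) + 1) := Int.emod_nonneg k (by omega)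
      have hrlt : k % ((i : Int) + 1) < (i : Int) + 1 := Int.emod_lt_of_pos k (by positivity)
      have hq0 : 0 ≤ k / ((i : Int) + 1) := Int.ediv_nonneg hk (by positivity)
      have hLle : counts[i] - k / ((i : Int) + 1) ≤ counts[i] := by omega
      have htake : ∀ x ∈ counts.take (i + 1), counts[i] - k / ((i : Int) + 1) ≤ x :=
        fun x hx => le_trans hLle (hci_take x hx)
      have htake1 : ∀ x ∈ counts.take (i + 1), counts[i] - k / ((i : Int) + 1) - 1 ≤ x :=
        fun x hx => by have := hci_take x hx; omega
      have hdropnil : counts.drop (i + 1) = [] := List.drop_eq_nil_of_le (by omega)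
      have hdrop : ∀ x ∈ counts.drop (i + 1), x ≤ counts[i] - k / ((i : Int) + 1) := by
        rw [hdropnil]
        simp
      have hdrop1 : ∀ x ∈ counts.drop (i + 1), x ≤ counts[i] - k / ((i : Int) + 1) - 1 := by
        rw [hdropnil]
        simp
      have eSL : pvS counts (counts[i] - k / ((i : Int) + 1))
          = (counts.take (i + 1)).sum - ((i : Int) + 1) * (counts[i] - k / ((i : Int) + 1)) := by
        rw [pvS_level counts (i + 1) _ htake hdrop, len1]
        push_cast
        ring
      have eSL1 : pvS counts (counts[i] - k / ((i : Int) + 1) - 1)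
          = (counts.take (i + 1)).sum - ((i : Int) + 1) * (counts[i] - k / ((i : Int) + 1) - 1) := by
        rw [pvS_level counts (i + 1) _ htake1 hdrop1, len1]
        push_cast
        ring
      have eMin := pvMin_level counts (i + 1) (counts[i] - k / ((i : Int) + 1)) htake hdrop
      rw [len1, hdropnil] at eMin
      have key1 : pvS counts (counts[i] - k / ((i : Int) + 1))
          = pvS counts (counts[i]) + ((i : Int) + 1) * (k / ((i : Int) + 1)) := by
        rw [eSL, eSci]
        ring
      have key2 : pvS counts (counts[i] - k / ((i : Int) + 1) - 1)
          = pvS counts (counts[i] - k / ((i : Int) + 1)) + ((i : Int) + 1) := by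
        rw [eSL1, eSL]
        ring
      refine ⟨counts[i] - k / ((i : Int) + 1), k % ((i : Int) + 1), ?_, ?_, ?_, ?_⟩
      · rw [hK, key1]
        linarith [hdm, hr0]
      · rw [hK, key2, key1]
        linarith [hdm, hrlt]
      · rw [hK, key1]
        linarith [hdm]
      · rw [eMin]
        simp only [List.map_nil, List.sum_nil]
        push_cast
        ring

lemma pvT_neg_eq (c : List Int) (L : Int) : pvT (c.map (fun v => -v)) (-L) = pvS c L := by
  unfold pvT pvS
  rw [List.map_map]
  refine congrArg List.sum (List.map_congr_left fun x _ => ?_)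
  simp only [Function.comp_apply]
  rw [show -L - -x = x - L by ring]

lemma pvSqMax_neg_eq (c : List Int) (L : Int) :
    pvSqMax (c.map (fun v => -v)) (-L) = (c.map (fun x => min x L * min x L)).sum := by
  unfold pvSqMax
  rw [List.map_map]
  refine congrArg List.sum (List.map_congr_left fun x _ => ?_)
  simp only [Function.comp_apply]
  rw [max_neg_neg, neg_mul_neg]

lemma sum_pow_two_eq (l : List Int) :
    (l.map (fun v => v ^ (2 : Nat))).sum = (l.map (fun v => v * v)).sum :=
  congrArg List.sum (List.map_congr_left fun x _ => by rw [pow_two])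

lemma counter_values_ne {xs : List Char} (h : xs ≠ []) :
    (PySem.Dict.counter xs).values ≠ [] := by
  obtain ⟨x, t, rfl⟩ := List.exists_cons_of_ne_nil h
  have hx : x ∈ PySem.Set.ofList (x :: t) := by
    rw [PySem.Set.mem_ofList]
    exact List.mem_cons_self ..
  have hofne : PySem.Set.ofList (x :: t) ≠ [] := List.ne_nil_of_mem hx
  intro hv
  have hit := PySem.Dict.items_counter (x :: t)
  simp only [PySem.Dict.values, hit] at hv
  rw [List.map_map, List.map_eq_nil_iff] at hv
  exact hofne hv

lemma pvAB (vals : List Int) (k : Int) (hne : vals ≠ [] ∨ k ≤ 0) :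
    ((pvLoopA k.toNat (vals.map (fun v => -v))).map (fun v => v ^ (2 : Nat))).sum
      = (if k ≤ 0 then pvSumSq (PySem.List.sorted vals (fun v => v) true)
         else pvGoB (PySem.List.sorted vals (fun v => v) true) k 0) := by
  have hperm : (PySem.List.sorted vals (fun v => v) true).Perm vals :=
    PySem.List.sorted_perm vals _ _
  have hpair : (PySem.List.sorted vals (fun v => v) true).Pairwise (fun a b => b ≤ a) :=
    PySem.List.sorted_pairwise_rev vals _
  rw [sum_pow_two_eq]
  by_cases hk : k ≤ 0
  · rw [if_pos hk, Int.toNat_of_nonpos hk]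
    unfold pvLoopA pvSumSq
    rw [List.map_map]
    exact (congrArg List.sum (List.map_congr_left fun x _ => by
      simp only [Function.comp_apply]
      rw [neg_mul_neg])).trans (sum_map_perm hperm.symm)
  · rw [if_neg hk]
    have hk0 : 0 < k := by omega
    have hvals : vals ≠ [] := hne.resolve_right hk
    have hcne : PySem.List.sorted vals (fun v => v) true ≠ [] := by
      intro h0
      exact hvals ((PySem.List.sorted_eq_nil_iff _ _ _).1 h0)
    have hlen0 : 0 < (PySem.List.sorted vals (fun v => v) true).length :=
      List.length_pos_of_ne_nil hcne
    have hS0 : pvS (PySem.List.sorted vals (fun v => v) true)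
        ((PySem.List.sorted vals (fun v => v) true)[0]'hlen0) = 0 := by
      rw [pvS_level _ 0 _ (by simp) (fun x hx => mem_drop_le hpair hlen0 hx)]
      simp
    obtain ⟨L, r, h1, h2, h3, hBval⟩ :=
      pvGoB_spec (PySem.List.sorted vals (fun v => v) true) hpair
        (PySem.List.sorted vals (fun v => v) true).length 0 k k (by omega) hlen0
        (le_of_lt hk0) (by rw [hS0]; ring)
    have hperm_sum : ∀ f : Int → Int,
        ((PySem.List.sorted vals (fun v => v) true).map f).sum = (vals.map f).sum :=
      fun f => sum_map_perm hperm
    have hSv : ∀ X : Int, pvS (PySem.List.sorted vals (fun v => v) true) X = pvS vals X :=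
      fun X => hperm_sum _
    have hA := pvMain k.toNat (vals.map (fun v => -v)) (-L) r
      (by
        intro h0
        exact hvals (List.map_eq_nil_iff.1 h0))
      (by rw [pvT_neg_eq, Int.toNat_of_nonneg (le_of_lt hk0), ← hSv]; exact h1)
      (by
        rw [show -L + 1 = -(L - 1) by ring, pvT_neg_eq, Int.toNat_of_nonneg (le_of_lt hk0),
          ← hSv]
        exact h2)
      (by rw [pvT_neg_eq, Int.toNat_of_nonneg (le_of_lt hk0), ← hSv]; omega)
    rw [hA, hBval, pvSqMax_neg_eq, hperm_sum]
    ring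

-- ===== VERDICT (by name: the statement is the Claim_ definition above) =====
theorem minimumValue_spec : Claim_equal_minimumValue := by
  intro s k hdom hpre
  show minimumValue s k = minimumValue_alt s k
  have hne : (PySem.Dict.counter s.toList).values ≠ [] ∨ k ≤ 0 := by
    rcases hpre with h | h
    · exact Or.inr h
    · refine Or.inl (counter_values_ne ?_)
      intro h0
      exact h (String.toList_eq_nil_iff.mp h0)
  exact pvAB _ k hne
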